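-- pv_equiv track=rewrite | github.com/dgjinsu/algorithm | python/프로그래머스/Lv.2/마법의 엘리베이터.py | solution
-- ===== SOURCE A (Python) =====
-- def solution(storey):
--     answer = 0
--     while storey:
--         num = storey % 10
--         flag = False
--         if num == 5:
--             tmp = storey // 10
--             if tmp % 10 >= 5:
--                 answer += (10 - num)
--                 flag = True
--             else:
--                 answer += num
--         if num > 5:
--             answer += (10 - num)
--             flag = True
--         if num < 5:
--             answer += num
--
--         storey //= 10
--         if flag:
--             storey += 1
--     return answer
-- ===== SOURCE B (Python) =====
-- def solution(storey):
--     # explore both choices (press down d, or press up 10-d with carry) and keep the minimum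
--     if storey < 10:
--         return min(storey, 11 - storey)
--     d = storey % 10
--     return min(d + solution(storey // 10), (10 - d) + solution(storey // 10 + 1))
-- ===== Notes on version B (the rewrite author's own statement) =====
-- stated objective: alternative
-- what changed: Replaced A's greedy per-digit decision with its next-digit look-ahead for a middle digit by a recursive min-of-two-choices computation that at each digit explores both pressing down (d presses) and pressing up with carry (10-d presses) and keeps the smaller total.
-- outside the precondition, e.g. on solution(-5): A returns 5, B returns -5
import Mathlib
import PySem

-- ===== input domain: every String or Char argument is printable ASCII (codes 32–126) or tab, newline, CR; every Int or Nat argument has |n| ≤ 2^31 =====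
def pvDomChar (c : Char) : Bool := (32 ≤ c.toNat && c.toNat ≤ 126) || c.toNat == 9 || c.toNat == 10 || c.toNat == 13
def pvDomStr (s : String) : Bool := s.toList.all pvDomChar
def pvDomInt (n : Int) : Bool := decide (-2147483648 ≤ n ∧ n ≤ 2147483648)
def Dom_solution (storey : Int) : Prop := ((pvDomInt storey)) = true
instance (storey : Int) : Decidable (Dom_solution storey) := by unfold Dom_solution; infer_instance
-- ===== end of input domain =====

-- B replaces A's greedy per-digit rule (with the equals-five look-ahead) by a recursive
-- min-of-both-choices computation over the digits; Pre_ restricts to the problem's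
-- natural domain storey ≥ 0 (on negative storeys B's base case returns the storey itself).


-- ===== PORT A =====
-- while-loop of A, with fuel as a totality guard (one unit per iteration; natAbs+1 suffices)
def solutionGo : Nat → Int → Int → Int
  | 0, _, answer => answer
  | fuel+1, storey, answer =>
    if storey = 0 then answer
    else
      let num := PySem.Int.mod storey 10
      -- flag starts False; the three `if`s of the loop body, in order
      let af : Int × Bool :=
        if num = 5 then
          let tmp := PySem.Int.floordiv storey 10
          if PySem.Int.mod tmp 10 ≥ 5 then (answer + (10 - num), true)
          else (answer + num, false)
        else (answer, false)
      let af := if num > 5 then (af.1 + (10 - num), true) else af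
      let a2 := if num < 5 then af.1 + num else af.1
      let s2 := PySem.Int.floordiv storey 10
      let s3 := if af.2 then s2 + 1 else s2
      solutionGo fuel s3 a2

def solution (storey : Int) : Int := solutionGo (storey.natAbs + 1) storey 0

-- ===== PORT B =====
def solution_alt (storey : Int) : Int :=
  if storey < 10 then min storey (11 - storey)
  else
    let d := PySem.Int.mod storey 10
    min (d + solution_alt (PySem.Int.floordiv storey 10))
        ((10 - d) + solution_alt (PySem.Int.floordiv storey 10 + 1))
termination_by storey.toNat
decreasing_by
  · rw [PySem.Int.floordiv_eq_ediv_of_pos (by norm_num)]; omega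
  · rw [PySem.Int.floordiv_eq_ediv_of_pos (by norm_num)]; omega

-- ===== PRECONDITION & SPEC =====
-- Pre_ restricts to the natural domain of the task (a storey number, ≥ 0); on negative
-- inputs A still returns a press count via floor division while B's base case returns
-- the (negative) storey itself.
def Pre_solution (storey : Int) : Prop := 0 ≤ storey
instance (storey : Int) : Decidable (Pre_solution storey) := by unfold Pre_solution; infer_instance
def pvWitness_solution : Int := 754

def Spec_solution (storey : Int) (out : Int) : Prop := out = solution_alt storey
instance (storey : Int) (out : Int) : Decidable (Spec_solution storey out) := by unfold Spec_solution; infer_instance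

-- ===== CLAIM (what is proved, stated in full; the proofs are below) =====
def Claim_equal_solution : Prop := ∀ (storey : Int), Dom_solution storey → Pre_solution storey → Spec_solution storey (solution storey)

-- ===== LEMMAS AND PROOFS =====

theorem alt_small (s : Int) (h : s < 10) : solution_alt s = min s (11 - s) := by
  rw [solution_alt]; simp [h]

theorem alt_big (s : Int) (h : ¬ s < 10) (_hs : 0 ≤ s) :
    solution_alt s = min (s % 10 + solution_alt (s / 10))
      ((10 - s % 10) + solution_alt (s / 10 + 1)) := by
  rw [solution_alt]
  simp only [h, if_false,
    PySem.Int.floordiv_eq_ediv_of_pos (a := s) (b := 10) (by norm_num),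
    PySem.Int.mod_eq_emod_of_pos (a := s) (b := 10) (by norm_num)]

-- adjacent values of solution_alt: which of alt q / alt (q+1) is smaller is decided by
-- the last digit of q, and they differ by at most 1
theorem alt_pair : ∀ (n : Nat) (q : Int), q.toNat = n → 0 ≤ q →
    ((q % 10 ≤ 4 → solution_alt q ≤ solution_alt (q+1) ∧ solution_alt (q+1) ≤ solution_alt q + 1) ∧
     (5 ≤ q % 10 → solution_alt (q+1) ≤ solution_alt q ∧ solution_alt q ≤ solution_alt (q+1) + 1)) := by
  intro n
  induction n using Nat.strong_induction_on with
  | _ n ih =>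
    intro q hn hq
    by_cases h9 : q ≤ 8
    · -- both sides use the base case
      rw [alt_small q (by omega), alt_small (q+1) (by omega)]
      have : q % 10 = q := by omega
      omega
    · by_cases h10 : q = 9
      · subst h10
        have a9 : solution_alt 9 = 2 := by rw [alt_small 9 (by norm_num)]; norm_num
        have a1 : solution_alt 1 = 1 := by rw [alt_small 1 (by norm_num)]; norm_num
        have a2 : solution_alt 2 = 2 := by rw [alt_small 2 (by norm_num)]; norm_num
        have a10 : solution_alt 10 = 1 := by
          rw [alt_big 10 (by norm_num) (by norm_num)]
          norm_num [a1, a2]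
        rw [(by norm_num : (9:Int) + 1 = 10), a9, a10]
        omega
      · -- q ≥ 10
        have hq10 : ¬ q < 10 := by omega
        set p := q / 10 with hp
        have hp0 : 0 ≤ p := by omega
        have hpq : p.toNat < n := by omega
        have ihp := ih p.toNat hpq p rfl hp0
        have dp : solution_alt p ≤ solution_alt (p+1) + 1 ∧
                  solution_alt (p+1) ≤ solution_alt p + 1 := by
          rcases ihp with ⟨h1, h2⟩
          by_cases hc : p % 10 ≤ 4
          · have := h1 hc; omega
          · have := h2 (by omega); omega
        rw [alt_big q hq10 hq]
        by_cases hr : q % 10 ≤ 8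
        · -- q+1 keeps the same quotient
          have hq1 : ¬ q + 1 < 10 := by omega
          have e1 : (q+1) % 10 = q % 10 + 1 := by omega
          have e2 : (q+1) / 10 = p := by omega
          rw [alt_big (q+1) hq1 (by omega), e1, e2, ← hp]
          omega
        · -- last digit 9: carry into the quotient
          have hr9 : q % 10 = 9 := by omega
          have hq1 : ¬ q + 1 < 10 := by omega
          have e1 : (q+1) % 10 = 0 := by omega
          have e2 : (q+1) / 10 = p + 1 := by omega
          have hp1q : (p+1).toNat < n := by omega
          have ihp1 := ih (p+1).toNat hp1q (p+1) rfl (by omega)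
          have dp1 : solution_alt (p+1) ≤ solution_alt (p+1+1) + 1 := by
            rcases ihp1 with ⟨h1, h2⟩
            by_cases hc : (p+1) % 10 ≤ 4
            · have := h1 hc; omega
            · have := h2 (by omega); omega
          rw [alt_big (q+1) hq1 (by omega), e1, e2, ← hp, hr9]
          omega

-- one iteration of A's loop, as the port computes it (addend and next storey per branch),
-- realises the minimum that solution_alt takes at s
theorem go_step (n : Nat) (ih : ∀ m, m < n → ∀ s : Int, s.toNat = m → 0 ≤ s →
      ∀ fuel ans, m < fuel → solutionGo fuel s ans = ans + solution_alt s)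
    (s : Int) (hn : s.toNat = n) (hs0 : 0 ≤ s) (hne : s ≠ 0)
    (fuel : Nat) (ans : Int) (hf : n < fuel + 1) :
    solutionGo (fuel+1) s ans = ans + solution_alt s := by
  have hs1 : 1 ≤ s := by omega
  have hmod : PySem.Int.mod s 10 = s % 10 :=
    PySem.Int.mod_eq_emod_of_pos (by norm_num)
  have hdiv : PySem.Int.floordiv s 10 = s / 10 :=
    PySem.Int.floordiv_eq_ediv_of_pos (by norm_num)
  have hpmod : PySem.Int.mod (s / 10) 10 = (s / 10) % 10 :=
    PySem.Int.mod_eq_emod_of_pos (by norm_num)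
  set p := s / 10 with hp
  have hp0 : 0 ≤ p := by omega
  have hplt : p.toNat < n := by omega
  have pair := alt_pair p.toNat p rfl hp0
  have dp : solution_alt p ≤ solution_alt (p+1) + 1 ∧
            solution_alt (p+1) ≤ solution_alt p + 1 := by
    rcases pair with ⟨ha, hb⟩
    by_cases hc : p % 10 ≤ 4
    · have := ha hc; omega
    · have := hb (by omega); omega
  rw [solutionGo]
  simp only [hmod, hdiv, hpmod, if_neg hne]
  by_cases h5 : s % 10 = 5
  · by_cases hps : s < 10
    · -- single-digit equals-five case: the look-ahead digit is zero, so no carry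
      have hs5 : s = 5 := by omega
      have hpz : p = 0 := by omega
      have hhi : ¬ p % 10 ≥ 5 := by omega
      simp [h5, hhi]
      have hrec := ih p.toNat hplt p rfl hp0 fuel (ans + 5) (by omega)
      rw [hrec, hpz, alt_small 0 (by norm_num), alt_small s hps]
      omega
    · have hp1lt : (p+1).toNat < n := by omega
      rw [alt_big s hps hs0, ← hp, h5]
      by_cases hhi : p % 10 ≥ 5
      · simp [hhi]
        have hrec := ih (p+1).toNat hp1lt (p+1) rfl (by omega) fuel
          (ans + 5) (by omega)
        rw [hrec]
        have h1 := pair.2 hhi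
        omega
      · simp [hhi]
        have hrec := ih p.toNat hplt p rfl hp0 fuel (ans + 5) (by omega)
        rw [hrec]
        have h1 := pair.1 (by omega)
        omega
  · by_cases hgt : 5 < s % 10
    · -- digit > 5: press up, carry
      have hps6 : 6 ≤ s := by omega
      have hp1lt : (p+1).toNat < n := by omega
      simp [h5, hgt, show ¬ s % 10 < 5 by omega]
      have hrec := ih (p+1).toNat hp1lt (p+1) rfl (by omega) fuel
        (ans + (10 - s % 10)) (by omega)
      rw [hrec]
      by_cases hps : s < 10
      · have hpz : p = 0 := by omega
        rw [alt_small s hps, hpz, show (0:Int) + 1 = 1 by norm_num,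
          alt_small 1 (by norm_num)]
        omega
      · rw [alt_big s hps hs0, ← hp]
        omega
    · -- digit < 5: press down, no carry
      have hlt : s % 10 < 5 := by omega
      simp [h5, show ¬ s % 10 > 5 by omega, hlt]
      have hrec := ih p.toNat hplt p rfl hp0 fuel (ans + s % 10) (by omega)
      rw [hrec]
      by_cases hps : s < 10
      · have hpz : p = 0 := by omega
        rw [alt_small s hps, hpz, alt_small 0 (by norm_num)]
        omega
      · rw [alt_big s hps hs0, ← hp]
        omega

theorem go_main : ∀ (n : Nat) (s : Int), s.toNat = n → 0 ≤ s →
    ∀ fuel ans, n < fuel → solutionGo fuel s ans = ans + solution_alt s := by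
  intro n
  induction n using Nat.strong_induction_on with
  | _ n ih =>
    intro s hn hs fuel ans hf
    match fuel with
    | fuel + 1 =>
      by_cases hz : s = 0
      · subst hz
        rw [solutionGo]
        simp [alt_small 0 (by norm_num)]
      · exact go_step n ih s hn hs hz fuel ans hf

-- ===== VERDICT (by name: the statement is the Claim_ definition above) =====
theorem solution_spec : Claim_equal_solution := by
  intro storey _ hpre
  unfold Pre_solution at hpre
  unfold Spec_solution solution
  have : storey.toNat = storey.natAbs := by omega
  rw [go_main storey.natAbs storey this hpre (storey.natAbs + 1) 0 (by omega)]
  omega
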